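-- pv_equiv track=rewrite | github.com/xuyuezoe/Meta-Writer | metabench/examples/build_medical_benchmark_assets.py | _build_must_include
-- ===== SOURCE A (Python) =====
-- from typing import Dict, List
--
-- def _build_must_include(
--     archetype_spec: Dict[str, object],
--     profile_spec: Dict[str, object],
--     domain_name: str,
--     subtopic: str,
--     focus_name: str,
--     context_keyword: str,
--     evidence_keyword: str,
--     slot_index: int,
-- ) -> List[str]:
--     """构造任务必须覆盖的锚点列表。
--
--     参数：
--         archetype_spec: 任务原型配置。
--         profile_spec: 约束风格配置。
--         domain_name: 医学域名称。
--         subtopic: 具体主题。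
--         focus_name: 核心焦点。
--         context_keyword: 场景关键词。
--         evidence_keyword: 医学证据关键词。
--         slot_index: 全局样本索引。
--
--     返回值：
--         List[str]：必须覆盖项列表。
--
--     关键实现细节：
--         共享硬锚点与可变补充锚点混合使用，使任务结构有共识但不完全同构。
--     """
--     organizer_anchor = str(profile_spec["organizer_anchor"])
--     bridge_anchor = str(profile_spec["bridge_anchor"])
--     closing_anchor = str(profile_spec["closing_anchor"])
--     base_items: List[str] = [
--         "研究范围",
--         organizer_anchor,
--         domain_name,
--         subtopic,
--         focus_name,
--         context_keyword,
--         evidence_keyword,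
--         "局限性",
--         "未来工作",
--     ]
--
--     extras_pool: List[str] = [
--         bridge_anchor,
--         closing_anchor,
--         str(archetype_spec["extra_anchor"]),
--         "比较",
--         "证据缺口",
--         "实践启示",
--         "风险收益",
--     ]
--
--     target_length = 8 + (slot_index % 5)
--     must_include: List[str] = []
--     for item in base_items + extras_pool:
--         if item not in must_include:
--             must_include.append(item)
--         if len(must_include) >= target_length:
--             break
--
--     if len(must_include) < 8:
--         raise ValueError("must_include 长度不足，至少需要 8 个锚点")
--     return must_include
-- ===== SOURCE B (Python) =====
-- from typing import Dict, List, FrozenSet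
--
--
-- def _pick(items: List[str], seen: FrozenSet[str], need: int) -> List[str]:
--     """Recursively select the next `need` anchors not yet seen, building the
--     result front-to-back by list construction instead of accumulator mutation."""
--     if need == 0 or not items:
--         return []
--     head, rest = items[0], items[1:]
--     if head in seen:
--         return _pick(rest, seen, need)
--     return [head] + _pick(rest, seen | {head}, need - 1)
--
--
-- def _build_must_include(
--     archetype_spec: Dict[str, object],
--     profile_spec: Dict[str, object],
--     domain_name: str,
--     subtopic: str,
--     focus_name: str,
--     context_keyword: str,
--     evidence_keyword: str,
--     slot_index: int,
-- ) -> List[str]: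
--     """Recursive re-implementation: select anchors by structural recursion over
--     the candidate list with a `need` countdown and an immutable `seen` set."""
--     base_items: List[str] = [
--         "研究范围",
--         str(profile_spec["organizer_anchor"]),
--         domain_name,
--         subtopic,
--         focus_name,
--         context_keyword,
--         evidence_keyword,
--         "局限性",
--         "未来工作",
--     ]
--     extras_pool: List[str] = [
--         str(profile_spec["bridge_anchor"]),
--         str(profile_spec["closing_anchor"]),
--         str(archetype_spec["extra_anchor"]),
--         "比较",
--         "证据缺口",
--         "实践启示",
--         "风险收益",
--     ]
--     must_include = _pick(base_items + extras_pool, frozenset(), 8 + slot_index % 5)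
--     if len(must_include) < 8:
--         raise ValueError("must_include 长度不足，至少需要 8 个锚点")
--     return must_include
-- ===== Notes on version B (the rewrite author's own statement) =====
-- stated objective: alternative
-- what changed: The iterative maintain-a-list-with-membership-test-and-early-break loop is replaced by a structural recursion over the candidate list that counts down the number of still-needed anchors, threads an immutable seen-set, and builds the result front-to-back by cons/concatenation instead of appending to a mutable accumulator.
import Mathlib
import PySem

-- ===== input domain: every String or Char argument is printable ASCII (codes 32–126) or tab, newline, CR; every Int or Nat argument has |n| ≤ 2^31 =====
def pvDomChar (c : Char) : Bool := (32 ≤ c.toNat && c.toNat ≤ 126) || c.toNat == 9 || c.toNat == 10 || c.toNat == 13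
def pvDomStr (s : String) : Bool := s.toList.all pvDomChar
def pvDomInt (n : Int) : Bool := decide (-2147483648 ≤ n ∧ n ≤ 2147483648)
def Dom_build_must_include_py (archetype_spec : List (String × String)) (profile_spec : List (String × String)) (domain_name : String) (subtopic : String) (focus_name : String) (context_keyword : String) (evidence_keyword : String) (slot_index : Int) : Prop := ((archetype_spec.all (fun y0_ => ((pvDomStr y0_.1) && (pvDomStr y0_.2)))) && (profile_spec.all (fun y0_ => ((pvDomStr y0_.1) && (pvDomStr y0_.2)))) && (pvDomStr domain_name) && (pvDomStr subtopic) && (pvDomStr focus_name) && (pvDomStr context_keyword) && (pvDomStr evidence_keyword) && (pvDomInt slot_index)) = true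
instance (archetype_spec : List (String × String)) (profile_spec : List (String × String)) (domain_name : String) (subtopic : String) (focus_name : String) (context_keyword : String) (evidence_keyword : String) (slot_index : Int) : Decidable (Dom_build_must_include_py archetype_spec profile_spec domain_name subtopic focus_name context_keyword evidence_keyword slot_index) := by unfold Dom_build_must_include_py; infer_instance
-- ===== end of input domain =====

-- ===== PORT A =====

-- ===== PORT A =====
-- B replaces A's iterative membership-test-with-early-break accumulator loop by a
-- structural recursion with a need countdown, building the result by cons (objective: alternative).

-- A's collection loop: for item in L: if item not in acc: acc.append(item); if len(acc) >= t: break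
def pvLoopA (L : List String) (acc : List String) (t : Int) : List String :=
  match L with
  | [] => acc
  | x :: xs =>
    let acc' := if acc.contains x then acc else acc ++ [x]
    if t ≤ (acc'.length : Int) then acc' else pvLoopA xs acc' t

def build_must_include_py (archetype_spec : List (String × String)) (profile_spec : List (String × String)) (domain_name : String) (subtopic : String) (focus_name : String) (context_keyword : String) (evidence_keyword : String) (slot_index : Int) : List String :=
  -- dict lookups: Pre_ guarantees the keys are present (KeyError excluded); getD "" is then the lookup
  let organizer_anchor := (PySem.Dict.mk profile_spec).getD "organizer_anchor" ""
  let bridge_anchor := (PySem.Dict.mk profile_spec).getD "bridge_anchor" ""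
  let closing_anchor := (PySem.Dict.mk profile_spec).getD "closing_anchor" ""
  let base_items : List String := ["研究范围", organizer_anchor, domain_name, subtopic, focus_name, context_keyword, evidence_keyword, "局限性", "未来工作"]
  let extras_pool : List String := [bridge_anchor, closing_anchor, (PySem.Dict.mk archetype_spec).getD "extra_anchor" "", "比较", "证据缺口", "实践启示", "风险收益"]
  let target_length := 8 + PySem.Int.mod slot_index 5
  -- Python's final 'if len(must_include) < 8: raise ValueError' never fires on Dom ∧ Pre_
  -- (seven pairwise distinct non-ASCII constant anchors plus at least one ASCII input string)
  pvLoopA (base_items ++ extras_pool) [] target_length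

-- ===== PORT B =====
-- Source B's _pick: recursion over the items with an immutable seen set and a need countdown
def pvPick (items : List String) (seen : List String) (need : Nat) : List String :=
  match items, need with
  | _, 0 => []
  | [], _ => []
  | x :: xs, Nat.succ n =>
    if seen.contains x then pvPick xs seen (n + 1)
    else x :: pvPick xs (PySem.Set.add seen x) n

def build_must_include_py_alt (archetype_spec : List (String × String)) (profile_spec : List (String × String)) (domain_name : String) (subtopic : String) (focus_name : String) (context_keyword : String) (evidence_keyword : String) (slot_index : Int) : List String :=
  let base_items : List String := ["研究范围", (PySem.Dict.mk profile_spec).getD "organizer_anchor" "", domain_name, subtopic, focus_name, context_keyword, evidence_keyword, "局限性", "未来工作"]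
  let extras_pool : List String := [(PySem.Dict.mk profile_spec).getD "bridge_anchor" "", (PySem.Dict.mk profile_spec).getD "closing_anchor" "", (PySem.Dict.mk archetype_spec).getD "extra_anchor" "", "比较", "证据缺口", "实践启示", "风险收益"]
  -- _pick(base + extras, frozenset(), 8 + slot_index % 5); the final raise never fires on Dom ∧ Pre_
  pvPick (base_items ++ extras_pool) [] (8 + PySem.Int.mod slot_index 5).toNat

-- ===== PRECONDITION & SPEC =====
-- Pre_ excludes only inputs where a dict key is missing, on which A raises KeyError.
def Pre_build_must_include_py (archetype_spec : List (String × String)) (profile_spec : List (String × String)) (domain_name : String) (subtopic : String) (focus_name : String) (context_keyword : String) (evidence_keyword : String) (slot_index : Int) : Prop :=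
  ((PySem.Dict.mk profile_spec).get? "organizer_anchor").isSome = true ∧
  ((PySem.Dict.mk profile_spec).get? "bridge_anchor").isSome = true ∧
  ((PySem.Dict.mk profile_spec).get? "closing_anchor").isSome = true ∧
  ((PySem.Dict.mk archetype_spec).get? "extra_anchor").isSome = true
instance (archetype_spec : List (String × String)) (profile_spec : List (String × String)) (domain_name : String) (subtopic : String) (focus_name : String) (context_keyword : String) (evidence_keyword : String) (slot_index : Int) : Decidable (Pre_build_must_include_py archetype_spec profile_spec domain_name subtopic focus_name context_keyword evidence_keyword slot_index) := by unfold Pre_build_must_include_py; infer_instance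

def pvWitness_build_must_include_py : (List (String × String)) × (List (String × String)) × String × String × String × String × String × Int :=
  ([("extra_anchor", "extra")], [("organizer_anchor", "org"), ("bridge_anchor", "bridge"), ("closing_anchor", "close")], "cardiology", "arrhythmia", "focus", "clinic", "evidence", 3)

def Spec_build_must_include_py (archetype_spec : List (String × String)) (profile_spec : List (String × String)) (domain_name : String) (subtopic : String) (focus_name : String) (context_keyword : String) (evidence_keyword : String) (slot_index : Int) (out : List String) : Prop := out = build_must_include_py_alt archetype_spec profile_spec domain_name subtopic focus_name context_keyword evidence_keyword slot_index
instance (archetype_spec : List (String × String)) (profile_spec : List (String × String)) (domain_name : String) (subtopic : String) (focus_name : String) (context_keyword : String) (evidence_keyword : String) (slot_index : Int) (out : List String) : Decidable (Spec_build_must_include_py archetype_spec profile_spec domain_name subtopic focus_name context_keyword evidence_keyword slot_index out) := by unfold Spec_build_must_include_py; infer_instance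

-- ===== CLAIM (what is proved, stated in full; the proofs are below) =====
def Claim_equal_build_must_include_py : Prop := ∀ (archetype_spec : List (String × String)) (profile_spec : List (String × String)) (domain_name : String) (subtopic : String) (focus_name : String) (context_keyword : String) (evidence_keyword : String) (slot_index : Int), Dom_build_must_include_py archetype_spec profile_spec domain_name subtopic focus_name context_keyword evidence_keyword slot_index → Pre_build_must_include_py archetype_spec profile_spec domain_name subtopic focus_name context_keyword evidence_keyword slot_index → Spec_build_must_include_py archetype_spec profile_spec domain_name subtopic focus_name context_keyword evidence_keyword slot_index (build_must_include_py archetype_spec profile_spec domain_name subtopic focus_name context_keyword evidence_keyword slot_index)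

-- ===== LEMMAS AND PROOFS =====
theorem pvWitness_ok : Dom_build_must_include_py (pvWitness_build_must_include_py.1) (pvWitness_build_must_include_py.2.1) (pvWitness_build_must_include_py.2.2.1) (pvWitness_build_must_include_py.2.2.2.1) (pvWitness_build_must_include_py.2.2.2.2.1) (pvWitness_build_must_include_py.2.2.2.2.2.1) (pvWitness_build_must_include_py.2.2.2.2.2.2.1) (pvWitness_build_must_include_py.2.2.2.2.2.2.2) ∧ Pre_build_must_include_py (pvWitness_build_must_include_py.1) (pvWitness_build_must_include_py.2.1) (pvWitness_build_must_include_py.2.2.1) (pvWitness_build_must_include_py.2.2.2.1) (pvWitness_build_must_include_py.2.2.2.2.1) (pvWitness_build_must_include_py.2.2.2.2.2.1) (pvWitness_build_must_include_py.2.2.2.2.2.2.1) (pvWitness_build_must_include_py.2.2.2.2.2.2.2) := by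
  decide

-- A's loop with target n not yet reached equals "append what B's recursion still picks"
theorem pvLoopA_eq_pick (L : List String) (acc : List String) (n : Nat)
    (h : acc.length < n) :
    pvLoopA L acc (n : Int) = acc ++ pvPick L acc (n - acc.length) := by
  induction L generalizing acc with
  | nil =>
    obtain ⟨k, hk⟩ : ∃ k, n - acc.length = k + 1 := ⟨n - acc.length - 1, by omega⟩
    rw [hk]
    simp [pvLoopA, pvPick]
  | cons x xs ih =>
    have hn : n - acc.length = (n - acc.length - 1) + 1 := by omega
    by_cases hmem : x ∈ acc
    · have hc : acc.contains x = true := by simpa using hmem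
      rw [hn]
      simp only [pvLoopA, hc, if_true, pvPick]
      rw [if_neg (by omega), ← hn]
      exact ih acc h
    · have hc : acc.contains x = false := by simpa using hmem
      have hadd : PySem.Set.add acc x = acc ++ [x] := by
        simp [PySem.Set.add, PySem.Set.contains, hmem]
      rw [hn]
      simp only [pvLoopA, hc, Bool.false_eq_true, if_false, pvPick, hadd]
      have hlen : (acc ++ [x]).length = acc.length + 1 := by simp
      by_cases hb : n ≤ acc.length + 1
      · have hz : n - acc.length - 1 = 0 := by omega
        rw [if_pos (by omega), hz]
        simp [pvPick]
      · rw [if_neg (by omega)]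
        rw [ih (acc ++ [x]) (by simp; omega), hlen]
        have : n - (acc.length + 1) = n - acc.length - 1 := by omega
        rw [this]
        simp

-- ===== VERDICT (by name: the statement is the Claim_ definition above) =====
theorem build_must_include_py_spec : Claim_equal_build_must_include_py := by
  intro archetype_spec profile_spec domain_name subtopic focus_name context_keyword evidence_keyword slot_index _ _
  unfold Spec_build_must_include_py build_must_include_py build_must_include_py_alt
  have hm0 : (0:Int) ≤ PySem.Int.mod slot_index 5 := PySem.Int.mod_nonneg _ (by norm_num)
  dsimp only
  have ht : (8 + PySem.Int.mod slot_index 5) = (((8 + PySem.Int.mod slot_index 5).toNat : Nat) : Int) := by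
    omega
  rw [ht, pvLoopA_eq_pick _ _ _ (by simp; omega)]
  simp
  congr 1
  omega
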